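-- pv_equiv track=rewrite | github.com/uiynyny/coding | python/csc108/lab6.py | loopy_madness_with_while_loops
-- ===== SOURCE A (Python) =====
-- def loopy_madness_with_while_loops(string1: str, string2: str) -> str:
--     """
--     The exact same function as loopy_madness from Lab 5, but we ask that you
--     change any for loops that you used to while loops. Refer back to Lab 5 for
--     the specifications of this function.
--
--     Keep in mind that since we will run the same tests, the same restrictions
--     from Lab 5 will apply to this function as well.
--
--     You are NOT allowed to use any for loops for this function.
--     """
--     i,j = 0,0
--     dir_i, dir_j = 1,1
--     result = ""
--     acc = 0
--     while acc < max(len(string1),len(string2)):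
--         acc += 1
--         if(i >= len(string1)-1):
--             dir_i = -1
--             i = len(string1)-1
--         elif(i <= 0):
--             dir_i = 1
--             i = 0
--         if(j >= len(string2) - 1):
--             dir_j = -1
--             j = len(string2) - 1
--         elif(j <= 0):
--             dir_j = 1
--             j = 0
--         result += string1[i] + string2[j]
--         i += dir_i
--         j += dir_j
--     return result
-- ===== SOURCE B (Python) =====
-- def loopy_madness_with_while_loops(string1: str, string2: str) -> str:
--     def idx(k: int, L: int) -> int:
--         # triangle-wave index: 0,1,...,L-1,L-2,...,1,0,1,... with period 2*(L-1)
--         if L <= 1: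
--             return 0
--         p = 2 * (L - 1)
--         t = k % p
--         return t if t < L else p - t
--     n = max(len(string1), len(string2))
--     return "".join(string1[idx(k, len(string1))] + string2[idx(k, len(string2))]
--                    for k in range(n))
-- ===== Notes on version B (the rewrite author's own statement) =====
-- stated objective: faster
-- what changed: Replaced A's stateful while loop with two bouncing cursors, direction flags and quadratic string concatenation by a single join over range(max(len1,len2)) that computes each string's index directly with a closed-form triangle-wave formula (t = k mod 2*(L-1), index = t if t < L else 2*(L-1)-t).
import Mathlib
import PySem

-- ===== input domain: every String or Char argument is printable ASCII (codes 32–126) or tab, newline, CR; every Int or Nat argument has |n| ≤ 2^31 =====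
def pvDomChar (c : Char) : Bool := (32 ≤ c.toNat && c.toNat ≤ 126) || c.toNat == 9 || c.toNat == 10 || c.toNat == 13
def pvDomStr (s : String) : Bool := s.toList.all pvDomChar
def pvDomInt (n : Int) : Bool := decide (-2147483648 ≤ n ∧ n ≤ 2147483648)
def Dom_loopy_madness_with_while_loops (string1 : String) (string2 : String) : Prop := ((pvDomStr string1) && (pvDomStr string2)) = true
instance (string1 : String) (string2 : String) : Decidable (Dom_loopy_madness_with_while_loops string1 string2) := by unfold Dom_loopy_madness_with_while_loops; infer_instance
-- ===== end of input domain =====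

-- B replaces A's mutable bouncing-cursor while loop (with quadratic string +=) by one
-- join pass computing each index via a closed-form triangle wave (objective: faster).

-- ===== PORT A =====
-- the two clamp-and-flip if/elif blocks of A's loop body (shared shape for i and j)
def pvClampA (len : Int) (i di : Int) : Int × Int :=
  if i ≥ len - 1 then (len - 1, -1)
  else if i ≤ 0 then (0, 1)
  else (i, di)

-- A's while loop: acc goes 0 → max(len,len), so fuel = remaining iterations;
-- the `none` branch of pyGet? is exactly where Python raises IndexError (outside Pre_)
def pvLoopA (l1 l2 : List Char) (fuel : Nat) (i di j dj : Int) (result : List Char) : List Char :=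
  match fuel with
  | 0 => result
  | f + 1 =>
    let (i', di') := pvClampA (l1.length : Int) i di
    let (j', dj') := pvClampA (l2.length : Int) j dj
    match PySem.List.pyGet? l1 i', PySem.List.pyGet? l2 j' with
    | some c1, some c2 => pvLoopA l1 l2 f (i' + di') di' (j' + dj') dj' (result ++ [c1, c2])
    | _, _ => result

def loopy_madness_with_while_loops (string1 : String) (string2 : String) : String :=
  let l1 := string1.toList
  let l2 := string2.toList
  String.ofList (pvLoopA l1 l2 (max l1.length l2.length) 0 1 0 1 [])

-- ===== PORT B =====
-- Source B's idx helper: triangle-wave index with period 2*(L-1)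
def pvIdxB (k : Int) (L : Int) : Int :=
  if L ≤ 1 then 0
  else
    let p := 2 * (L - 1)
    let t := PySem.Int.mod k p
    if t < L then t else p - t

-- Source B's per-k pair string1[idx..] + string2[idx..]; none = IndexError (outside Pre_)
def pvChunkB (l1 l2 : List Char) (k : Nat) : List Char :=
  match PySem.List.pyGet? l1 (pvIdxB (k : Int) (l1.length : Int)),
        PySem.List.pyGet? l2 (pvIdxB (k : Int) (l2.length : Int)) with
  | some c1, some c2 => [c1, c2]
  | _, _ => []

def loopy_madness_with_while_loops_alt (string1 : String) (string2 : String) : String :=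
  let l1 := string1.toList
  let l2 := string2.toList
  let n := max l1.length l2.length
  String.ofList (((List.range n).map (pvChunkB l1 l2)).flatten)

-- ===== PRECONDITION & SPEC =====
-- Pre_ excludes exactly the inputs where A raises IndexError: one string empty and
-- the other nonempty (A indexes the empty string at -1). B raises there too.
def Pre_loopy_madness_with_while_loops (string1 : String) (string2 : String) : Prop :=
  (string1.toList = [] ∧ string2.toList = []) ∨ (string1.toList ≠ [] ∧ string2.toList ≠ [])
instance (string1 : String) (string2 : String) : Decidable (Pre_loopy_madness_with_while_loops string1 string2) := by unfold Pre_loopy_madness_with_while_loops; infer_instance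

def pvWitness_loopy_madness_with_while_loops : String × String := ("abc", "xy")

def Spec_loopy_madness_with_while_loops (string1 : String) (string2 : String) (out : String) : Prop := out = loopy_madness_with_while_loops_alt string1 string2
instance (string1 : String) (string2 : String) (out : String) : Decidable (Spec_loopy_madness_with_while_loops string1 string2 out) := by unfold Spec_loopy_madness_with_while_loops; infer_instance

-- ===== CLAIM (what is proved, stated in full; the proofs are below) =====
def Claim_equal_loopy_madness_with_while_loops : Prop := ∀ (string1 : String) (string2 : String), Dom_loopy_madness_with_while_loops string1 string2 → Pre_loopy_madness_with_while_loops string1 string2 → Spec_loopy_madness_with_while_loops string1 string2 (loopy_madness_with_while_loops string1 string2)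

-- ===== LEMMAS AND PROOFS =====

-- Nat-valued triangle wave (proof-side mirror of pvIdxB)
def pvTri (L k : Nat) : Nat :=
  if L ≤ 1 then 0
  else if k % (2 * (L - 1)) < L then k % (2 * (L - 1)) else 2 * (L - 1) - k % (2 * (L - 1))

-- direction held by A's cursor after the clamp at step k
def pvDir (L k : Nat) : Int :=
  if L ≤ 1 then (if k % 2 = 0 then -1 else 1)
  else if k % (2 * (L - 1)) < L - 1 then 1 else -1

lemma pvIdxB_eq (L k : Nat) : pvIdxB (k : Int) (L : Int) = (pvTri L k : Int) := by
  by_cases h1 : L ≤ 1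
  · have : (L : Int) ≤ 1 := by exact_mod_cast h1
    simp [pvIdxB, pvTri, h1, this]
  · have hL1 : ¬ ((L : Int) ≤ 1) := by
      have : (2 : Int) ≤ (L : Int) := by exact_mod_cast (show 2 ≤ L by omega)
      omega
    have hlt := Nat.mod_lt k (show 0 < 2 * (L - 1) by omega)
    simp only [pvIdxB, pvTri, if_neg h1, if_neg hL1]
    rw [show (2 : Int) * ((L : Int) - 1) = ((2 * (L - 1) : Nat) : Int) from by push_cast; omega,
        PySem.Int.mod_natCast]
    split_ifs <;> omega
lemma pvTri_lt (L k : Nat) (hL : 1 ≤ L) : pvTri L k < L := by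
  by_cases h1 : L ≤ 1
  · simp [pvTri, h1]; omega
  · have hlt := Nat.mod_lt k (show 0 < 2 * (L - 1) by omega)
    simp only [pvTri, if_neg h1]
    split_ifs <;> omega

-- state of one cursor at the START of iteration k of A's loop
def pvPS (L k : Nat) (i di : Int) : Prop :=
  (k = 0 ∧ i = 0 ∧ di = 1) ∨ (∃ m, k = m + 1 ∧ di = pvDir L m ∧ i = (pvTri L m : Int) + di)

lemma pvClamp_step (L k : Nat) (i di : Int) (hL : 1 ≤ L) (h : pvPS L k i di) :
    pvClampA (L : Int) i di = ((pvTri L k : Int), pvDir L k) := by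
  rcases h with ⟨hk, hi, hdi⟩ | ⟨m, hk, hdi, hi⟩
  · subst hk hi hdi
    by_cases h1 : L ≤ 1
    · have hL1 : L = 1 := by omega
      subst hL1
      simp [pvClampA, pvTri, pvDir]
    · have hg : ¬ ((0 : Int) ≥ (L : Int) - 1) := by
        have : (2 : Int) ≤ (L : Int) := by exact_mod_cast (show 2 ≤ L by omega)
        omega
      have h0 : 0 % (2 * (L - 1)) < L - 1 := by
        rw [Nat.zero_mod]; omega
      simp only [pvClampA, pvTri, pvDir, if_neg h1, if_neg hg, if_pos (le_refl (0 : Int)),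
        Nat.zero_mod]
      simp only [Prod.mk.injEq, Nat.cast_ite]
      constructor <;> simp <;> omega
  · subst hk hdi hi
    by_cases h1 : L ≤ 1
    · have hL1 : L = 1 := by omega
      subst hL1
      by_cases hm : m % 2 = 0
      · have hm1 : (m + 1) % 2 = 1 := by omega
        simp [pvClampA, pvTri, pvDir, hm, hm1]
      · have hm1 : (m + 1) % 2 = 0 := by omega
        simp [pvClampA, pvTri, pvDir, hm, hm1]
    · have hL2 : 2 ≤ L := by omega
      have hp : 0 < 2 * (L - 1) := by omega
      have hlt := Nat.mod_lt m hp
      have hs : (m + 1) % (2 * (L - 1)) =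
          (if m % (2 * (L - 1)) + 1 = 2 * (L - 1) then 0 else m % (2 * (L - 1)) + 1) := by
        have h1' : (m + 1) % (2 * (L - 1)) = (m % (2 * (L - 1)) + 1) % (2 * (L - 1)) := by
          conv_lhs => rw [Nat.add_mod]
          rw [Nat.mod_eq_of_lt (show 1 < 2 * (L - 1) by omega)]
        rw [h1']
        split_ifs with he
        · rw [he, Nat.mod_self]
        · exact Nat.mod_eq_of_lt (by omega)
      obtain ⟨r, hr⟩ : ∃ r, m % (2 * (L - 1)) = r := ⟨_, rfl⟩
      obtain ⟨s, hq⟩ : ∃ s, (m + 1) % (2 * (L - 1)) = s := ⟨_, rfl⟩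
      rw [hr] at hlt hs
      rw [hq] at hs
      have hs' : (r + 1 = 2 * (L - 1) ∧ s = 0) ∨ (r + 1 ≠ 2 * (L - 1) ∧ s = r + 1) := by
        split_ifs at hs with he
        · exact Or.inl ⟨he, hs⟩
        · exact Or.inr ⟨he, hs⟩
      simp only [pvClampA, pvTri, pvDir, if_neg h1]
      rw [hr, hq]
      rcases hs' with ⟨he, hse⟩ | ⟨he, hse⟩ <;> subst hse <;>
        split_ifs <;>
          first
            | omega
            | rfl
            | (rw [Prod.mk.injEq]; exact ⟨by omega, by omega⟩)

lemma pvChunkB_eq (l1 l2 : List Char) (h1 : 1 ≤ l1.length) (h2 : 1 ≤ l2.length) (k : Nat) :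
    pvChunkB l1 l2 k =
      [l1[pvTri l1.length k]'(pvTri_lt _ _ h1), l2[pvTri l2.length k]'(pvTri_lt _ _ h2)] := by
  unfold pvChunkB
  rw [pvIdxB_eq l1.length k, pvIdxB_eq l2.length k, PySem.List.pyGet?_natCast,
    PySem.List.pyGet?_natCast, List.getElem?_eq_getElem (pvTri_lt _ _ h1),
    List.getElem?_eq_getElem (pvTri_lt _ _ h2)]

lemma pvLoop_eq (l1 l2 : List Char) (h1 : 1 ≤ l1.length) (h2 : 1 ≤ l2.length)
    (fuel : Nat) : ∀ (k : Nat) (i di j dj : Int) (res : List Char),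
    pvPS l1.length k i di → pvPS l2.length k j dj →
    pvLoopA l1 l2 fuel i di j dj res
      = res ++ ((List.range' k fuel).map (pvChunkB l1 l2)).flatten := by
  induction fuel with
  | zero => intro k i di j dj res _ _; simp [pvLoopA]
  | succ f ih =>
    intro k i di j dj res hps1 hps2
    have hc1 := pvClamp_step l1.length k i di h1 hps1
    have hc2 := pvClamp_step l2.length k j dj h2 hps2
    simp only [pvLoopA, hc1, hc2]
    rw [PySem.List.pyGet?_natCast, PySem.List.pyGet?_natCast,
      List.getElem?_eq_getElem (pvTri_lt _ _ h1), List.getElem?_eq_getElem (pvTri_lt _ _ h2)]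
    simp only []
    rw [ih (k + 1) _ _ _ _ _ (Or.inr ⟨k, rfl, rfl, rfl⟩) (Or.inr ⟨k, rfl, rfl, rfl⟩)]
    rw [List.range'_succ, List.map_cons, List.flatten_cons, pvChunkB_eq l1 l2 h1 h2 k]
    simp

-- ===== VERDICT (by name: the statement is the Claim_ definition above) =====
theorem loopy_madness_with_while_loops_spec : Claim_equal_loopy_madness_with_while_loops := by
  intro string1 string2 _ hpre
  unfold Spec_loopy_madness_with_while_loops
  simp only [loopy_madness_with_while_loops, loopy_madness_with_while_loops_alt]
  rcases hpre with ⟨h1, h2⟩ | ⟨h1, h2⟩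
  · simp [h1, h2, pvLoopA]
  · have h1' : 1 ≤ string1.toList.length := List.length_pos_iff.mpr h1
    have h2' : 1 ≤ string2.toList.length := List.length_pos_iff.mpr h2
    rw [pvLoop_eq string1.toList string2.toList h1' h2' _ 0 0 1 0 1 []
      (Or.inl ⟨rfl, rfl, rfl⟩) (Or.inl ⟨rfl, rfl, rfl⟩)]
    rw [List.range_eq_range']
    simp
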